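-- pv_equiv track=rewrite | github.com/sjlarrain/Herramientas | L02/SolucionL02.py | problema_4
-- ===== SOURCE A (Python) =====
-- def problema_4(lista1,lista2):
--     class Letra:
--         def __init__(self,let):
--             self.let=let
--             self.pos=""
--             self.ady=[]
--         def add_ady(self,letra):
--             self.ady.append(letra)
--         def add_pos(self,tup):
--             self.pos=tup
--         def __str__(self):
--             return self.let
--
--     def crear_grafo(lista2):        #La construccion de esta funcion se baso en la de la actividad 2
--         grafo=dict()   #Diccionario para construir el grafo. Nos permite ver las letras y la tupla incorporada
--         filas=len(lista2) #Demarcamos el tamaño de la matriz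
--         columnas=len(lista2[0])
--         for e in range(filas): #Recorremos para irconstruyendo el grafo
--             for f in range(columnas):
--                 if (e,f) not in grafo.keys(): #De no estar en el diccionario significa que no a sido construido. APlicamos clase
--                     letras=Letra(lista2[e][f])
--                     letras.add_pos((e,f))
--                     grafo.update({(e,f):letras})
--                 for i, j in[(-1,0),(0,-1),(1,0),(0,1),(-1,-1),(-1,1),(1,-1),(1,1)]: #Analizamos a todos sus adyacentes en toda
--                     if i+e>=0 and j+f>=0 and i+e<filas and j+f<columnas: #direccion y vemos si esta en la matriz
--                         if (i+e, j+f) not in grafo.keys(): #De existir y no haber sido construido aplicamos cosntruccion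
--                             ady=Letra(lista2[i+e][j+f])
--                             ady.add_pos((i+e,j+f))
--                             grafo.update({(i+e,j+f):ady})
--                         else:
--                             ady=grafo[(i+e,j+f)]
--                         grafo[(e,f)].add_ady(ady) #Por ultimo lo agregamos a los adyacentes de la posicion recorrida
--         return grafo
--
--     def construir(objeto, palabra,resul,n):  #Construye la palabra y si logra construirla de forma recursiva.
--         for r in objeto.ady:                #De lo cntrario no retorna nada. Solo devolvera si n es igual al largo de la palabra
--             if n==len(palabra):
--                 return resul
--             elif r.let==palabra[n]:
--                 resul+=r.let
--                 sg=construir(r,palabra,resul,n+1)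
--                 return sg
--
--     def buscar_palabra(palabra,grafo): #Busca la primera letra en el grafo para asi encontrar la posicon donde empezar
--         for e in range (len(lista2)): #a buscar recursivamente con construir
--             for f in range(len(lista2[0])):
--                 dic=grafo[(e,f)]
--                 if dic.let==palabra[0]:
--                     return[dic,dic.let]
--
--     grafo=crear_grafo(lista2)
--     encontradas=set()
--     for e in lista1:
--         pal=buscar_palabra(e,grafo) #Busca la letra, si lo hace, sigue buscando recursivamente, de lo contrario
--         if pal:          #Pasa a la siguiente
--             pal1=construir(pal[0],e,pal[1],1)
--         if pal1: encontradas.add(pal1)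
--     return encontradas
-- ===== SOURCE B (Python) =====
-- def problema_4(lista1, lista2):
--     # Direct grid search: no Letra class, no precomputed graph; neighbors are
--     # generated on the fly and construir is an iterative while-loop.  The
--     # top-level loop is kept verbatim from the original (including the pal1
--     # reuse on unfound words).
--     dirs = [(-1, 0), (0, -1), (1, 0), (0, 1), (-1, -1), (-1, 1), (1, -1), (1, 1)]
--     filas = len(lista2)
--     cols = len(lista2[0])
--
--     def vecinos(e, f):
--         return [(e + i, f + j) for i, j in dirs
--                 if 0 <= e + i < filas and 0 <= f + j < cols]
--
--     def buscar(w):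
--         first = w[0]
--         return next(((e, f) for e in range(filas) for f in range(cols)
--                      if lista2[e][f] == first), None)
--
--     def construir(pos, w):
--         resul = w[0]
--         n = 1
--         while n < len(w):
--             nxt = next(((a, b) for a, b in vecinos(*pos)
--                         if lista2[a][b] == w[n]), None)
--             if nxt is None:
--                 return None
--             resul += lista2[nxt[0]][nxt[1]]
--             pos = nxt
--             n += 1
--         return resul
--
--     encontradas = set()
--     for w in lista1:
--         pos = buscar(w)
--         if pos is not None:
--             pal1 = construir(pos, w)
--         if pal1:
--             encontradas.add(pal1)
--     return encontradas
-- ===== Notes on version B (the rewrite author's own statement) =====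
-- stated objective: simpler
-- what changed: Drops the Letra object graph and the crear_grafo precomputation: B searches the grid directly with on-the-fly in-bounds neighbor generation, a generator-based first-match buscar, and an iterative while-loop construir instead of the recursion; the top-level loop (including the pal1 reuse on unfound words) is kept verbatim.
-- intended difference: On a 1x1 grid whose single cell appears as a word in lista1, A returns a set missing that one-letter word (its construir only returns when the cell has a neighbor) while B includes it, which is the intended result of a word search. — e.g. on problema_4(["a"], [["a"]]): A returns [], B returns ["a"]
import Mathlib
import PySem

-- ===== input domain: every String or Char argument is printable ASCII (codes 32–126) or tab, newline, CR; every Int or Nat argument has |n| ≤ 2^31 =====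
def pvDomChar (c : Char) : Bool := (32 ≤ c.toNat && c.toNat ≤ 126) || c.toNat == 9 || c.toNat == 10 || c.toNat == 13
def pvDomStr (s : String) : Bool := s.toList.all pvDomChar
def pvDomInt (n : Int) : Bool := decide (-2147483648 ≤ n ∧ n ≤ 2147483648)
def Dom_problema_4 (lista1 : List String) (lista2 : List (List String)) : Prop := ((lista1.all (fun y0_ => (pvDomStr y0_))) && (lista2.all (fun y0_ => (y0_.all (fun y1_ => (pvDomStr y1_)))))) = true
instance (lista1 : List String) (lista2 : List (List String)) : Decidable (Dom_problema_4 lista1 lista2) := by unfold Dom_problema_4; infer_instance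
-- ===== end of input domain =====

-- B drops the Letra-object graph of A: it searches the grid directly with on-the-fly
-- neighbor generation and an iterative (loop) construir; objective: simpler.
-- Intended difference (D_): on a 1x1 grid whose cell occurs as a word in lista1, A's
-- construir never returns (the cell has no neighbor), so A omits that one-letter word;
-- B includes it, the intended result of a word search.

-- shared indexing helpers (both Pythons write lista2[e][f] and w[n])
def pvCell (lista2 : List (List String)) (e f : Int) : String :=
  PySem.List.pyGetD (PySem.List.pyGetD lista2 e []) f ""

-- w[n] as the 1-character string Python returns ("" only where Python would raise; excluded by Pre_)
def pvCharAt (w : String) (n : Int) : String :=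
  match PySem.Str.pyGet? w n with
  | some c => String.ofList [c]
  | none => ""

def pvDirs : List (Int × Int) := [(-1,0),(0,-1),(1,0),(0,1),(-1,-1),(-1,1),(1,-1),(1,1)]

-- ===== PORT A =====
-- Python's Letra object: its `ady` list of object REFERENCES is modeled as the list of
-- keys into the grafo dict (the heap); dereference = grafo lookup.
structure PvLetra where
  llet : String
  pos : Int × Int
  ady : List (Int × Int)
deriving Repr, DecidableEq

def pvLetraDflt : PvLetra := ⟨"", (0, 0), []⟩

def pvCrearGrafo (lista2 : List (List String)) : PySem.Dict (Int × Int) PvLetra :=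
  let filas : Int := PySem.List.len lista2
  let columnas : Int := PySem.List.len (PySem.List.pyGetD lista2 0 [])
  (PySem.List.pyRange 0 filas 1).foldl (fun g e =>
    (PySem.List.pyRange 0 columnas 1).foldl (fun g f =>
      let g := if g.contains (e, f) then g
               else g.insert (e, f) ⟨pvCell lista2 e f, (e, f), []⟩
      pvDirs.foldl (fun g ij =>
        if ij.1 + e ≥ 0 ∧ ij.2 + f ≥ 0 ∧ ij.1 + e < filas ∧ ij.2 + f < columnas then
          let g := if g.contains (ij.1 + e, ij.2 + f) then g
                   else g.insert (ij.1 + e, ij.2 + f) ⟨pvCell lista2 (ij.1 + e) (ij.2 + f), (ij.1 + e, ij.2 + f), []⟩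
          g.modify (e, f) pvLetraDflt (fun L => ⟨L.llet, L.pos, L.ady ++ [(ij.1 + e, ij.2 + f)]⟩)
        else g) g) g) PySem.Dict.empty

-- construir: recursion over the ady list; `fuel` only totalizes the object hops
-- (it is len(palabra), never exhausted where the Python returns).
-- the `for r in objeto.ady` scan; `next` is the recursive call made on a match
def pvConstruirScan (g : PySem.Dict (Int × Int) PvLetra) (palabra : String)
    (next : (Int × Int) → String → Nat → Option String) :
    List (Int × Int) → String → Nat → Option String
  | [], _, _ => none
  | r :: rest, resul, n =>
    if n = palabra.toList.length then some resul
    else if (g.getD r pvLetraDflt).llet = pvCharAt palabra (n : Int) then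
      next r (resul ++ (g.getD r pvLetraDflt).llet) (n + 1)
    else pvConstruirScan g palabra next rest resul n

def pvConstruir (g : PySem.Dict (Int × Int) PvLetra) (palabra : String) :
    Nat → List (Int × Int) → String → Nat → Option String
  | 0 => pvConstruirScan g palabra (fun _ _ _ => none)
  | fuel + 1 => pvConstruirScan g palabra
      (fun r resul n => pvConstruir g palabra fuel ((g.getD r pvLetraDflt).ady) resul n)

def pvBuscar (lista2 : List (List String)) (g : PySem.Dict (Int × Int) PvLetra)
    (palabra : String) : Option ((Int × Int) × String) :=
  (PySem.List.pyRange 0 (PySem.List.len lista2) 1).findSome? fun e =>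
    (PySem.List.pyRange 0 (PySem.List.len (PySem.List.pyGetD lista2 0 [])) 1).findSome? fun f =>
      let dic := g.getD (e, f) pvLetraDflt
      if dic.llet = pvCharAt palabra 0 then some ((e, f), dic.llet) else none

def problema_4 (lista1 : List String) (lista2 : List (List String)) : List String :=
  let grafo := pvCrearGrafo lista2
  -- state: (encontradas, pal1); pal1 = none means "not yet assigned" (Python NameError
  -- if read there — those inputs are excluded by Pre_problema_4)
  (lista1.foldl (fun (st : PySem.Set String × Option (Option String)) e =>
    let pal := pvBuscar lista2 grafo e
    let pal1 := match pal with
      | some p => some (pvConstruir grafo e e.toList.length ((grafo.getD p.1 pvLetraDflt).ady) p.2 1)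
      | none => st.2
    match pal1 with
    | some (some s) => (PySem.Set.add st.1 s, pal1)
    | _ => (st.1, pal1)) (PySem.Set.empty, none)).1

-- ===== PORT B =====
def pvAltNbrs (filas cols e f : Int) : List (Int × Int) :=
  (pvDirs.filter (fun ij =>
    decide (0 ≤ e + ij.1 ∧ e + ij.1 < filas ∧ 0 ≤ f + ij.2 ∧ f + ij.2 < cols))).map
    (fun ij => (e + ij.1, f + ij.2))

def pvAltBuscar (lista2 : List (List String)) (filas cols : Int) (w : String) :
    Option (Int × Int) :=
  (PySem.List.pyRange 0 filas 1).findSome? fun e =>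
    (PySem.List.pyRange 0 cols 1).findSome? fun f =>
      if pvCell lista2 e f = pvCharAt w 0 then some (e, f) else none

-- the while-loop of Source B; `fuel` only totalizes it (= len(w), never exhausted)
def pvAltConstruir (lista2 : List (List String)) (filas cols : Int) (w : String) :
    Nat → (Int × Int) → String → Nat → Option String
  | fuel, pos, resul, n =>
    if n < w.toList.length then
      match (pvAltNbrs filas cols pos.1 pos.2).findSome?
          (fun ab => if pvCell lista2 ab.1 ab.2 = pvCharAt w (n : Int) then some ab else none) with
      | none => none
      | some nxt =>
        match fuel with
        | 0 => none
        | fuel' + 1 =>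
          pvAltConstruir lista2 filas cols w fuel' nxt
            (resul ++ pvCell lista2 nxt.1 nxt.2) (n + 1)
    else some resul

def problema_4_alt (lista1 : List String) (lista2 : List (List String)) : List String :=
  let filas : Int := PySem.List.len lista2
  let cols : Int := PySem.List.len (PySem.List.pyGetD lista2 0 [])
  -- top-level loop kept verbatim from A (state (encontradas, pal1); pal1 = none means
  -- "not yet assigned": Python NameError there, excluded by Pre_problema_4)
  (lista1.foldl (fun (st : PySem.Set String × Option (Option String)) w =>
    let pos := pvAltBuscar lista2 filas cols w
    let pal1 := match pos with
      | some p => some (pvAltConstruir lista2 filas cols w w.toList.length p (pvCharAt w 0) 1)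
      | none => st.2
    match pal1 with
    | some o =>
      match o with
      | some s => (PySem.Set.add st.1 s, pal1)
      | none => (st.1, pal1)
    | none => (st.1, pal1)) (PySem.Set.empty, none)).1

-- ===== PRECONDITION & SPEC =====
-- Pre_ is exactly A's no-raise domain: it excludes the empty grid (IndexError on
-- len(lista2[0])), rows shorter than row 0 (IndexError in crear_grafo), empty words
-- (IndexError on palabra[0]) and a first word whose first letter is nowhere in the grid
-- (NameError: pal1 read before assignment).
def Pre_problema_4 (lista1 : List String) (lista2 : List (List String)) : Prop :=
  lista2 ≠ [] ∧
  (∀ row ∈ lista2, (lista2.headD []).length ≤ row.length) ∧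
  (∀ w ∈ lista1, w ≠ "") ∧
  (lista1 = [] ∨ ∃ row ∈ lista2, ∃ c ∈ row.take (lista2.headD []).length,
    c = pvCharAt (lista1.headD "") 0)
instance (lista1 : List String) (lista2 : List (List String)) : Decidable (Pre_problema_4 lista1 lista2) := by unfold Pre_problema_4; infer_instance

def pvWitness_problema_4 : List String × List (List String) :=
  (["a", "ab", "ba", "aa"], [["a", "a", "a"], ["a", "a", "a"], ["a", "a", "a"]])

-- On a 1x1 grid whose single cell occurs as a word in lista1, A returns a set missing
-- that one-letter word (construir only returns when the cell has a neighbor) while B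
-- includes it — the intended result of a word search.
def D_problema_4 (lista1 : List String) (lista2 : List (List String)) : Prop :=
  lista2.length = 1 ∧ (lista2.headD []).length = 1 ∧ (lista2.headD []).headD "" ∈ lista1
instance (lista1 : List String) (lista2 : List (List String)) : Decidable (D_problema_4 lista1 lista2) := by unfold D_problema_4; infer_instance

def Spec_problema_4 (lista1 : List String) (lista2 : List (List String)) (out : List String) : Prop :=
  ¬ D_problema_4 lista1 lista2 → out = problema_4_alt lista1 lista2
instance (lista1 : List String) (lista2 : List (List String)) (out : List String) : Decidable (Spec_problema_4 lista1 lista2 out) := by unfold Spec_problema_4; infer_instance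

def pvDiffWitness_problema_4 : List String × List (List String) := (["a"], [["a"]])
def pvDiffWitnessOut_problema_4 : (List String) × (List String) := ([], ["a"])

-- ===== CLAIM (what is proved, stated in full; the proofs are below) =====
def Claim_unchanged_problema_4 : Prop := ∀ (lista1 : List String) (lista2 : List (List String)), Dom_problema_4 lista1 lista2 → Pre_problema_4 lista1 lista2 → Spec_problema_4 lista1 lista2 (problema_4 lista1 lista2)
def Claim_changed_problema_4 : Prop := Dom_problema_4 (pvDiffWitness_problema_4.1) (pvDiffWitness_problema_4.2) ∧ Pre_problema_4 (pvDiffWitness_problema_4.1) (pvDiffWitness_problema_4.2) ∧ D_problema_4 (pvDiffWitness_problema_4.1) (pvDiffWitness_problema_4.2) ∧ problema_4 (pvDiffWitness_problema_4.1) (pvDiffWitness_problema_4.2) = pvDiffWitnessOut_problema_4.1 ∧ problema_4_alt (pvDiffWitness_problema_4.1) (pvDiffWitness_problema_4.2) = pvDiffWitnessOut_problema_4.2 ∧ pvDiffWitnessOut_problema_4.1 ≠ pvDiffWitnessOut_problema_4.2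
def Claim_exact_problema_4 : Prop := ∀ (lista1 : List String) (lista2 : List (List String)), Dom_problema_4 lista1 lista2 → Pre_problema_4 lista1 lista2 → D_problema_4 lista1 lista2 → problema_4 lista1 lista2 ≠ problema_4_alt lista1 lista2


-- ===== LEMMAS AND PROOFS =====

-- proof-side abbreviations for the grid bounds
def pvF (l2 : List (List String)) : Int := PySem.List.len l2
def pvC (l2 : List (List String)) : Int := PySem.List.len (PySem.List.pyGetD l2 0 ([] : List String))
def pvInb (l2 : List (List String)) (a b : Int) : Bool :=
  decide (a ≥ 0 ∧ b ≥ 0 ∧ a < pvF l2 ∧ b < pvC l2)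
def pvNbrsFrom (l2 : List (List String)) (ds : List (Int × Int)) (e f : Int) : List (Int × Int) :=
  (ds.filter (fun ij => pvInb l2 (ij.1 + e) (ij.2 + f))).map (fun ij => (ij.1 + e, ij.2 + f))
def pvNbrs (l2 : List (List String)) (e f : Int) : List (Int × Int) := pvNbrsFrom l2 pvDirs e f
def pvReach (l2 : List (List String)) (P : List (Int × Int)) (k : Int × Int) : Bool :=
  decide (k ∈ P) || P.any (fun p => decide (k ∈ pvNbrs l2 p.1 p.2))
def pvVal (l2 : List (List String)) (P : List (Int × Int)) (k : Int × Int) : PvLetra :=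
  if k ∈ P then ⟨pvCell l2 k.1 k.2, k, pvNbrs l2 k.1 k.2⟩
  else if pvReach l2 P k then ⟨pvCell l2 k.1 k.2, k, []⟩
  else pvLetraDflt
def pvValIn (l2 : List (List String)) (P : List (Int × Int)) (c : Int × Int)
    (ds : List (Int × Int)) (k : Int × Int) : PvLetra :=
  if k = c then ⟨pvCell l2 c.1 c.2, c, pvNbrsFrom l2 ds c.1 c.2⟩
  else if k ∈ P then ⟨pvCell l2 k.1 k.2, k, pvNbrs l2 k.1 k.2⟩
  else if pvReach l2 P k || decide (k ∈ pvNbrsFrom l2 ds c.1 c.2) then ⟨pvCell l2 k.1 k.2, k, []⟩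
  else pvLetraDflt
def pvContIn (l2 : List (List String)) (P : List (Int × Int)) (c : Int × Int)
    (ds : List (Int × Int)) (k : Int × Int) : Bool :=
  decide (k = c) || pvReach l2 P k || decide (k ∈ pvNbrsFrom l2 ds c.1 c.2)

-- the two loop bodies of crear_grafo, named for the proofs
def pvDirStep (l2 : List (List String)) (e f : Int)
    (g : PySem.Dict (Int × Int) PvLetra) (ij : Int × Int) : PySem.Dict (Int × Int) PvLetra :=
  if ij.1 + e ≥ 0 ∧ ij.2 + f ≥ 0 ∧ ij.1 + e < pvF l2 ∧ ij.2 + f < pvC l2 then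
    let g := if g.contains (ij.1 + e, ij.2 + f) then g
             else g.insert (ij.1 + e, ij.2 + f) ⟨pvCell l2 (ij.1 + e) (ij.2 + f), (ij.1 + e, ij.2 + f), []⟩
    g.modify (e, f) pvLetraDflt (fun L => ⟨L.llet, L.pos, L.ady ++ [(ij.1 + e, ij.2 + f)]⟩)
  else g
def pvCellStep (l2 : List (List String)) (g : PySem.Dict (Int × Int) PvLetra)
    (c : Int × Int) : PySem.Dict (Int × Int) PvLetra :=
  let g := if g.contains (c.1, c.2) then g
           else g.insert (c.1, c.2) ⟨pvCell l2 c.1 c.2, (c.1, c.2), []⟩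
  pvDirs.foldl (pvDirStep l2 c.1 c.2) g
def pvCells (l2 : List (List String)) : List (Int × Int) :=
  (PySem.List.pyRange 0 (pvF l2) 1).flatMap
    (fun e => (PySem.List.pyRange 0 (pvC l2) 1).map (fun f => (e, f)))

lemma pvCrearGrafo_eq (l2 : List (List String)) :
    pvCrearGrafo l2 = (pvCells l2).foldl (pvCellStep l2) PySem.Dict.empty := by
  unfold pvCells
  rw [List.foldl_flatMap]
  simp only [List.foldl_map]
  rfl

lemma pvNbrsFrom_append (l2 : List (List String)) (ds : List (Int × Int)) (d : Int × Int)
    (e f : Int) :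
    pvNbrsFrom l2 (ds ++ [d]) e f =
      pvNbrsFrom l2 ds e f ++
        (if pvInb l2 (d.1 + e) (d.2 + f) then [(d.1 + e, d.2 + f)] else []) := by
  simp only [pvNbrsFrom, List.filter_append, List.map_append, List.filter_cons, List.filter_nil]
  split <;> simp

lemma pvDirStep_inv (l2 : List (List String)) (P : List (Int × Int)) (e f : Int)
    (d : Int × Int) (hd : ¬(d.1 = 0 ∧ d.2 = 0)) (ds : List (Int × Int))
    (g : PySem.Dict (Int × Int) PvLetra)
    (h1 : ∀ k, g.getD k pvLetraDflt = pvValIn l2 P (e, f) ds k)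
    (h2 : ∀ k, g.contains k = pvContIn l2 P (e, f) ds k) :
    (∀ k, (pvDirStep l2 e f g d).getD k pvLetraDflt = pvValIn l2 P (e, f) (ds ++ [d]) k) ∧
    (∀ k, (pvDirStep l2 e f g d).contains k = pvContIn l2 P (e, f) (ds ++ [d]) k) := by
  unfold pvDirStep
  by_cases hc : d.1 + e ≥ 0 ∧ d.2 + f ≥ 0 ∧ d.1 + e < pvF l2 ∧ d.2 + f < pvC l2
  case neg =>
    rw [if_neg hc]
    have hinb : pvInb l2 (d.1 + e) (d.2 + f) = false := by
      unfold pvInb; exact decide_eq_false hc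
    have hfrom : pvNbrsFrom l2 (ds ++ [d]) e f = pvNbrsFrom l2 ds e f := by
      rw [pvNbrsFrom_append, hinb]; simp
    constructor <;> intro k
    · rw [h1 k]; unfold pvValIn; rw [hfrom]
    · rw [h2 k]; unfold pvContIn; rw [hfrom]
  case pos =>
    rw [if_pos hc]
    have hndc : (d.1 + e, d.2 + f) ≠ (e, f) := by
      intro h
      rw [Prod.mk.injEq] at h
      exact hd ⟨by omega, by omega⟩
    have hinb : pvInb l2 (d.1 + e) (d.2 + f) = true := by
      unfold pvInb; exact decide_eq_true hc
    have hfrom : pvNbrsFrom l2 (ds ++ [d]) e f =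
        pvNbrsFrom l2 ds e f ++ [(d.1 + e, d.2 + f)] := by
      rw [pvNbrsFrom_append, if_pos hinb]
    have hmemnew : ∀ k : Int × Int, (k ∈ pvNbrsFrom l2 (ds ++ [d]) e f) ↔
        (k ∈ pvNbrsFrom l2 ds e f ∨ k = (d.1 + e, d.2 + f)) := by
      intro k; rw [hfrom]; simp
    -- g1: the dict after the optional insert of the neighbor
    set nd : Int × Int := (d.1 + e, d.2 + f) with hnddef
    set g1 := if g.contains nd then g
              else g.insert nd ⟨pvCell l2 (d.1 + e) (d.2 + f), nd, []⟩ with hg1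
    have hg1c : ∀ k, g1.contains k = (decide (k = nd) || g.contains k) := by
      intro k
      rw [hg1]
      by_cases hcont : g.contains nd
      · rw [if_pos hcont]
        by_cases hk : k = nd
        · subst hk; simp [hcont]
        · simp [hk]
      · rw [if_neg hcont, PySem.Dict.contains_insert]
        by_cases hk : k = nd
        · subst hk; simp
        · simp [hk]
    have hg1v_ne : ∀ k, k ≠ (e, f) → g1.getD k pvLetraDflt = pvValIn l2 P (e, f) (ds ++ [d]) k := by
      intro k hkc
      by_cases hk : k = nd
      · subst hk
        by_cases hcont : g.contains nd
        · rw [hg1, if_pos hcont]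
          rw [h1 nd]
          have hcont' := h2 nd
          rw [hcont] at hcont'
          unfold pvContIn at hcont'
          unfold pvValIn
          rw [if_neg hkc, if_neg hkc]
          by_cases hP : nd ∈ P
          · rw [if_pos hP, if_pos hP]
          · rw [if_neg hP, if_neg hP]
            have hro : (pvReach l2 P nd || decide (nd ∈ pvNbrsFrom l2 ds e f)) = true := by
              rcases Bool.or_eq_true_iff.mp hcont'.symm with h | h
              · rcases Bool.or_eq_true_iff.mp h with h' | h'
                · exact absurd (of_decide_eq_true h') hkc
                · simp [h']
              · simp [h]
            rw [if_pos hro, if_pos (by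
              rcases Bool.or_eq_true_iff.mp hro with h | h
              · simp [h]
              · simp [hmemnew, of_decide_eq_true h])]
        · rw [hg1, if_neg hcont, PySem.Dict.getD_insert, if_pos rfl]
          have hcont' := h2 nd
          unfold pvContIn at hcont'
          have hnotP : nd ∉ P := by
            intro hP
            apply hcont
            rw [hcont']
            unfold pvReach
            simp [hP]
          unfold pvValIn
          rw [if_neg hkc, if_neg hnotP, if_pos (by simp [hmemnew])]
      · have hgk : g1.getD k pvLetraDflt = g.getD k pvLetraDflt := by
          rw [hg1]
          by_cases hcont : g.contains nd
          · rw [if_pos hcont]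
          · rw [if_neg hcont, PySem.Dict.getD_insert, if_neg hk]
        rw [hgk, h1 k]
        unfold pvValIn
        rw [if_neg hkc, if_neg hkc]
        by_cases hP : k ∈ P
        · rw [if_pos hP, if_pos hP]
        · rw [if_neg hP, if_neg hP]
          have : decide (k ∈ pvNbrsFrom l2 (ds ++ [d]) e f) = decide (k ∈ pvNbrsFrom l2 ds e f) := by
            simp only [hmemnew, hk, or_false]
          rw [this]
    have hg1v_c : g1.getD (e, f) pvLetraDflt = pvValIn l2 P (e, f) ds (e, f) := by
      rw [hg1]
      by_cases hcont : g.contains nd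
      · rw [if_pos hcont, h1]
      · rw [if_neg hcont, PySem.Dict.getD_insert, if_neg (fun h => hndc h.symm), h1]
    constructor <;> intro k
    · rw [PySem.Dict.getD_modify]
      by_cases hk : k = (e, f)
      · rw [if_pos hk, hg1v_c]
        unfold pvValIn
        rw [if_pos rfl]
        subst hk
        rw [if_pos rfl, hfrom]
      · rw [if_neg hk]
        exact hg1v_ne k hk
    · rw [PySem.Dict.contains_modify, hg1c k, h2 k]
      unfold pvContIn
      by_cases hk : k = (e, f)
      · subst hk; simp
      · by_cases hknd : k = nd
        · subst hknd
          simp [hmemnew, Bool.beq_eq_decide_eq]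
        · simp only [hmemnew]
          have h1' : (k == (e, f)) = false := by simp [hk]
          have h2' : decide (k = nd) = false := by simp [hknd]
          have h3' : decide (k = (e, f)) = false := by simp [hk]
          simp [h1', h3', hknd]

lemma pvDirs_foldl_inv (l2 : List (List String)) (P : List (Int × Int)) (e f : Int) :
    ∀ (ds2 ds1 : List (Int × Int)), (∀ d ∈ ds2, ¬(d.1 = 0 ∧ d.2 = 0)) →
    ∀ (g : PySem.Dict (Int × Int) PvLetra),
    (∀ k, g.getD k pvLetraDflt = pvValIn l2 P (e, f) ds1 k) →
    (∀ k, g.contains k = pvContIn l2 P (e, f) ds1 k) →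
    (∀ k, (ds2.foldl (pvDirStep l2 e f) g).getD k pvLetraDflt = pvValIn l2 P (e, f) (ds1 ++ ds2) k) ∧
    (∀ k, (ds2.foldl (pvDirStep l2 e f) g).contains k = pvContIn l2 P (e, f) (ds1 ++ ds2) k) := by
  intro ds2
  induction ds2 with
  | nil => intro ds1 _ g h1 h2; simp only [List.foldl_nil, List.append_nil]; exact ⟨h1, h2⟩
  | cons d ds2 ih =>
    intro ds1 hds g h1 h2
    have hstep := pvDirStep_inv l2 P e f d (hds d (by simp)) ds1 g h1 h2
    have := ih (ds1 ++ [d]) (fun x hx => hds x (by simp [hx])) (pvDirStep l2 e f g d)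
      hstep.1 hstep.2
    simpa using this

lemma pvCellStep_inv (l2 : List (List String)) (P : List (Int × Int)) (c : Int × Int)
    (hcP : c ∉ P) (g : PySem.Dict (Int × Int) PvLetra)
    (h1 : ∀ k, g.getD k pvLetraDflt = pvVal l2 P k)
    (h2 : ∀ k, g.contains k = pvReach l2 P k) :
    (∀ k, (pvCellStep l2 g c).getD k pvLetraDflt = pvVal l2 (P ++ [c]) k) ∧
    (∀ k, (pvCellStep l2 g c).contains k = pvReach l2 (P ++ [c]) k) := by
  obtain ⟨e, f⟩ := c
  have hreach_app : ∀ k, pvReach l2 (P ++ [(e, f)]) k = pvContIn l2 P (e, f) pvDirs k := by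
    intro k
    apply Bool.eq_iff_iff.mpr
    simp only [pvReach, pvContIn, pvNbrs, List.any_append, List.mem_append, List.mem_singleton,
      List.any_cons, List.any_nil, Bool.or_eq_true, decide_eq_true_eq]
    tauto
  have hval_app : ∀ k, pvVal l2 (P ++ [(e, f)]) k = pvValIn l2 P (e, f) pvDirs k := by
    intro k
    unfold pvVal pvValIn
    by_cases hk : k = (e, f)
    · subst hk
      rw [if_pos (by simp), if_pos rfl]
      rfl
    · rw [if_neg hk]
      have hmem : ((k ∈ P ++ [(e, f)]) ↔ (k ∈ P)) := by simp [hk]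
      by_cases hP : k ∈ P
      · rw [if_pos (hmem.mpr hP), if_pos hP]
      · rw [if_neg (fun h => hP (hmem.mp h)), if_neg hP]
        have : pvReach l2 (P ++ [(e, f)]) k =
            (pvReach l2 P k || decide (k ∈ pvNbrsFrom l2 pvDirs e f)) := by
          rw [hreach_app k]
          unfold pvContIn
          simp [hk]
        rw [this]
  -- the first branch of the cell's iteration establishes the inner invariant at ds = []
  set g1 := if g.contains (e, f) then g else g.insert (e, f) ⟨pvCell l2 e f, (e, f), []⟩ with hg1
  have h1' : ∀ k, g1.getD k pvLetraDflt = pvValIn l2 P (e, f) [] k := by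
    intro k
    have hnil : pvNbrsFrom l2 [] e f = [] := rfl
    by_cases hk : k = (e, f)
    · subst hk
      rw [hg1]
      by_cases hcont : g.contains (e, f)
      · rw [if_pos hcont, h1]
        unfold pvVal pvValIn
        rw [if_neg hcP, if_pos rfl, if_pos (by rw [← h2]; exact hcont), hnil]
      · rw [if_neg hcont, PySem.Dict.getD_insert, if_pos rfl]
        unfold pvValIn
        rw [if_pos rfl, hnil]
    · have : g1.getD k pvLetraDflt = g.getD k pvLetraDflt := by
        rw [hg1]
        by_cases hcont : g.contains (e, f)
        · rw [if_pos hcont]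
        · rw [if_neg hcont, PySem.Dict.getD_insert, if_neg hk]
      rw [this, h1]
      unfold pvVal pvValIn
      rw [if_neg hk]
      by_cases hP : k ∈ P
      · rw [if_pos hP, if_pos hP]
      · rw [if_neg hP, if_neg hP, hnil]
        simp
  have h2' : ∀ k, g1.contains k = pvContIn l2 P (e, f) [] k := by
    intro k
    have hnil : pvNbrsFrom l2 [] e f = [] := rfl
    unfold pvContIn
    rw [hnil]
    by_cases hk : k = (e, f)
    · subst hk
      rw [hg1]
      by_cases hcont : g.contains (e, f)
      · rw [if_pos hcont]
        simp [hcont]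
      · rw [if_neg hcont, PySem.Dict.contains_insert]
        simp
    · have : g1.contains k = g.contains k := by
        rw [hg1]
        by_cases hcont : g.contains (e, f)
        · rw [if_pos hcont]
        · rw [if_neg hcont, PySem.Dict.contains_insert]
          simp [hk]
      rw [this, h2]
      simp [hk]
  have := pvDirs_foldl_inv l2 P e f pvDirs [] (by decide) g1 h1' h2'
  simp only [List.nil_append] at this
  exact ⟨fun k => by rw [show pvCellStep l2 g (e, f) = pvDirs.foldl (pvDirStep l2 e f) g1 from rfl,
      this.1 k, hval_app k],
    fun k => by rw [show pvCellStep l2 g (e, f) = pvDirs.foldl (pvDirStep l2 e f) g1 from rfl,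
      this.2 k, hreach_app k]⟩

lemma pvGrafo_inv (l2 : List (List String)) :
    ∀ (Q P : List (Int × Int)), Q.Nodup → (∀ c ∈ Q, c ∉ P) →
    ∀ (g : PySem.Dict (Int × Int) PvLetra),
    (∀ k, g.getD k pvLetraDflt = pvVal l2 P k) →
    (∀ k, g.contains k = pvReach l2 P k) →
    (∀ k, (Q.foldl (pvCellStep l2) g).getD k pvLetraDflt = pvVal l2 (P ++ Q) k) := by
  intro Q
  induction Q with
  | nil => intro P _ _ g h1 _; simpa using h1
  | cons c Q ih =>
    intro P hnd hQP g h1 h2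
    have hstep := pvCellStep_inv l2 P c (hQP c (by simp)) g h1 h2
    have := ih (P ++ [c]) hnd.of_cons
      (fun x hx => by
        simp only [List.mem_append, List.mem_singleton]
        rintro (h | rfl)
        · exact hQP x (by simp [hx]) h
        · exact (List.nodup_cons.mp hnd).1 hx)
      (pvCellStep l2 g c) hstep.1 hstep.2
    simpa using this

lemma pvGrafo_getD (l2 : List (List String)) (e f : Int) (h : pvInb l2 e f = true) :
    (pvCrearGrafo l2).getD (e, f) pvLetraDflt =
      ⟨pvCell l2 e f, (e, f), pvNbrs l2 e f⟩ := by
  have hnd : (pvCells l2).Nodup := by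
    unfold pvCells
    rw [List.nodup_flatMap]
    refine ⟨fun e _ => (PySem.List.nodup_pyRange_one _ _).map (by intro a b h; injection h), ?_⟩
    refine (PySem.List.nodup_pyRange_one _ _).imp ?_
    intro a b hab
    simp only [Function.onFun, List.Disjoint]
    intro x hx hx'
    simp only [List.mem_map] at hx hx'
    obtain ⟨u, _, rfl⟩ := hx
    obtain ⟨v, _, h⟩ := hx'
    injection h with h1 h2
    exact absurd h1.symm (by omega)
  have hmem : (e, f) ∈ pvCells l2 := by
    unfold pvCells
    simp only [List.mem_flatMap, List.mem_map]
    unfold pvInb at h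
    rw [decide_eq_true_eq] at h
    exact ⟨e, PySem.List.mem_pyRange_one.mpr ⟨by omega, by omega⟩,
      f, PySem.List.mem_pyRange_one.mpr ⟨by omega, by omega⟩, rfl⟩
  have hinv := pvGrafo_inv l2 (pvCells l2) [] hnd (by simp) PySem.Dict.empty
    (fun k => by
      rw [PySem.Dict.getD_empty]
      unfold pvVal pvReach
      simp)
    (fun k => by
      rw [PySem.Dict.contains_empty]
      unfold pvReach
      simp)
  rw [← pvCrearGrafo_eq] at hinv
  rw [hinv (e, f)]
  unfold pvVal
  rw [if_pos (by simpa using hmem)]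


lemma pvFindSome?_congr {a b : Type} (l : List a) (f g : a → Option b)
    (h : ∀ x ∈ l, f x = g x) : l.findSome? f = l.findSome? g := by
  induction l with
  | nil => rfl
  | cons x l ih =>
    rw [List.findSome?_cons, List.findSome?_cons, h x (by simp),
      ih (fun y hy => h y (by simp [hy]))]

lemma pvFindSome?_option_map {a b c : Type} (l : List a) (f : a → Option b) (g : b → c) :
    Option.map g (l.findSome? f) = l.findSome? (fun x => Option.map g (f x)) := by
  induction l with
  | nil => rfl
  | cons x l ih =>
    rw [List.findSome?_cons, List.findSome?_cons]
    cases f x <;> simp [ih]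

lemma pvAltNbrs_eq (l2 : List (List String)) (e f : Int) :
    pvAltNbrs (pvF l2) (pvC l2) e f = pvNbrs l2 e f := by
  unfold pvAltNbrs pvNbrs pvNbrsFrom
  rw [List.filter_congr (q := fun ij => pvInb l2 (ij.1 + e) (ij.2 + f))
    (fun ij _ => by unfold pvInb; exact decide_eq_decide.mpr (by omega))]
  exact List.map_congr_left (fun ij _ => by
    rw [Prod.mk.injEq]; exact ⟨Int.add_comm e ij.1, Int.add_comm f ij.2⟩)

lemma pvNbrs_mem_inb (l2 : List (List String)) (e f : Int) (k : Int × Int)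
    (h : k ∈ pvNbrs l2 e f) : pvInb l2 k.1 k.2 = true := by
  unfold pvNbrs pvNbrsFrom at h
  simp only [List.mem_map, List.mem_filter] at h
  obtain ⟨ij, ⟨_, hinb⟩, rfl⟩ := h
  exact hinb

lemma pvNbrs_ne_nil (l2 : List (List String)) (e f : Int) (h : pvInb l2 e f = true)
    (hbig : ¬(pvF l2 = 1 ∧ pvC l2 = 1)) : pvNbrs l2 e f ≠ [] := by
  have key : ∀ d ∈ pvDirs, pvInb l2 (d.1 + e) (d.2 + f) = true → pvNbrs l2 e f ≠ [] := by
    intro d hd hc hnil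
    have hm : (d.1 + e, d.2 + f) ∈ pvNbrs l2 e f := by
      unfold pvNbrs pvNbrsFrom
      exact List.mem_map_of_mem (List.mem_filter.mpr ⟨hd, hc⟩)
    rw [hnil] at hm
    exact absurd hm (List.not_mem_nil)
  unfold pvInb at h
  rw [decide_eq_true_eq] at h
  by_cases hC : 2 ≤ pvC l2
  · by_cases hf : f + 1 < pvC l2
    · exact key (0, 1) (by decide) (by unfold pvInb; rw [decide_eq_true_eq]; omega)
    · exact key (0, -1) (by decide) (by unfold pvInb; rw [decide_eq_true_eq]; omega)
  · have hF : 2 ≤ pvF l2 := by omega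
    by_cases he : e + 1 < pvF l2
    · exact key (1, 0) (by decide) (by unfold pvInb; rw [decide_eq_true_eq]; omega)
    · exact key (-1, 0) (by decide) (by unfold pvInb; rw [decide_eq_true_eq]; omega)

lemma pvNbrs_one (l2 : List (List String)) (e f : Int) (h11 : pvF l2 = 1 ∧ pvC l2 = 1)
    (h : pvInb l2 e f = true) : pvNbrs l2 e f = [] := by
  unfold pvInb at h
  rw [decide_eq_true_eq] at h
  unfold pvNbrs pvNbrsFrom
  rw [List.filter_eq_nil_iff.mpr, List.map_nil]
  intro d hd
  fin_cases hd <;>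
    (unfold pvInb; simp only [Bool.not_eq_true, decide_eq_false_iff_not]; omega)

-- the ady scan is a first-match search
lemma pvConstruirScan_eq (g : PySem.Dict (Int × Int) PvLetra) (w : String)
    (next : (Int × Int) → String → Nat → Option String) (l : List (Int × Int))
    (resul : String) (n : Nat) (hn : n ≠ w.toList.length) :
    pvConstruirScan g w next l resul n =
      match l.findSome? (fun r =>
          if (g.getD r pvLetraDflt).llet = pvCharAt w (n : Int) then some r else none) with
      | none => none
      | some r => next r (resul ++ (g.getD r pvLetraDflt).llet) (n + 1) := by
  induction l with
  | nil => rfl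
  | cons r l ih =>
    rw [pvConstruirScan, List.findSome?_cons]
    by_cases hm : (g.getD r pvLetraDflt).llet = pvCharAt w (n : Int)
    · rw [if_neg hn, if_pos hm]
      rw [if_pos hm]
    · rw [if_neg hn, if_neg hm]
      rw [if_neg hm]
      exact ih

lemma pvConstruirScan_len (g : PySem.Dict (Int × Int) PvLetra) (w : String)
    (next : (Int × Int) → String → Nat → Option String) (l : List (Int × Int))
    (resul : String) (hl : l ≠ []) :
    pvConstruirScan g w next l resul w.toList.length = some resul := by
  cases l with
  | nil => exact absurd rfl hl
  | cons r l => rw [pvConstruirScan, if_pos rfl]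

lemma pvConstruir_eq (l2 : List (List String)) (hbig : ¬(pvF l2 = 1 ∧ pvC l2 = 1))
    (w : String) :
    ∀ (fuel : Nat) (obj : Int × Int), pvInb l2 obj.1 obj.2 = true →
    ∀ (resul : String) (n : Nat), n ≤ w.toList.length →
    pvConstruir (pvCrearGrafo l2) w fuel (pvNbrs l2 obj.1 obj.2) resul n =
      pvAltConstruir l2 (pvF l2) (pvC l2) w fuel obj resul n := by
  intro fuel
  induction fuel with
  | zero =>
    intro obj hobj resul n hn
    have hne := pvNbrs_ne_nil l2 obj.1 obj.2 hobj hbig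
    by_cases heq : n = w.toList.length
    · subst heq
      rw [pvConstruir, pvConstruirScan_len _ _ _ _ _ hne, pvAltConstruir,
        if_neg (by omega)]
    · have hlt : n < w.toList.length := by omega
      rw [pvConstruir, pvConstruirScan_eq _ _ _ _ _ _ heq, pvAltConstruir, if_pos hlt,
        pvAltNbrs_eq]
      have hcong : (pvNbrs l2 obj.1 obj.2).findSome? (fun r =>
            if (( pvCrearGrafo l2).getD r pvLetraDflt).llet = pvCharAt w (n : Int) then some r else none) =
          (pvNbrs l2 obj.1 obj.2).findSome? (fun ab =>
            if pvCell l2 ab.1 ab.2 = pvCharAt w (n : Int) then some ab else none) := by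
        apply pvFindSome?_congr
        intro r hr
        have hinb := pvNbrs_mem_inb l2 obj.1 obj.2 r hr
        rw [show ((pvCrearGrafo l2).getD r pvLetraDflt).llet = pvCell l2 r.1 r.2 from by
          rw [show r = (r.1, r.2) from rfl, pvGrafo_getD l2 r.1 r.2 hinb]]
      rw [hcong]
  | succ fuel ih =>
    intro obj hobj resul n hn
    have hne := pvNbrs_ne_nil l2 obj.1 obj.2 hobj hbig
    by_cases heq : n = w.toList.length
    · subst heq
      rw [pvConstruir, pvConstruirScan_len _ _ _ _ _ hne, pvAltConstruir,
        if_neg (by omega)]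
    · have hlt : n < w.toList.length := by omega
      rw [pvConstruir, pvConstruirScan_eq _ _ _ _ _ _ heq, pvAltConstruir, if_pos hlt,
        pvAltNbrs_eq]
      have hcong : (pvNbrs l2 obj.1 obj.2).findSome? (fun r =>
            if ((pvCrearGrafo l2).getD r pvLetraDflt).llet = pvCharAt w (n : Int) then some r else none) =
          (pvNbrs l2 obj.1 obj.2).findSome? (fun ab =>
            if pvCell l2 ab.1 ab.2 = pvCharAt w (n : Int) then some ab else none) := by
        apply pvFindSome?_congr
        intro r hr
        have hinb := pvNbrs_mem_inb l2 obj.1 obj.2 r hr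
        rw [show ((pvCrearGrafo l2).getD r pvLetraDflt).llet = pvCell l2 r.1 r.2 from by
          rw [show r = (r.1, r.2) from rfl, pvGrafo_getD l2 r.1 r.2 hinb]]
      rw [hcong]
      cases hfs : (pvNbrs l2 obj.1 obj.2).findSome? (fun ab =>
          if pvCell l2 ab.1 ab.2 = pvCharAt w (n : Int) then some ab else none) with
      | none => rfl
      | some r =>
        obtain ⟨a, ha, hfa⟩ := List.exists_of_findSome?_eq_some hfs
        have har : a = r ∧ pvCell l2 a.1 a.2 = pvCharAt w (n : Int) := by
          by_cases hc : pvCell l2 a.1 a.2 = pvCharAt w (n : Int)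
          · rw [if_pos hc] at hfa
            exact ⟨Option.some.inj hfa, hc⟩
          · rw [if_neg hc] at hfa
            exact absurd hfa (by simp)
        obtain ⟨rfl, hcell⟩ := har
        have hinb := pvNbrs_mem_inb l2 obj.1 obj.2 a ha
        have hady : ((pvCrearGrafo l2).getD a pvLetraDflt).ady = pvNbrs l2 a.1 a.2 := by
          rw [show a = (a.1, a.2) from rfl, pvGrafo_getD l2 a.1 a.2 hinb]
        have hllet : ((pvCrearGrafo l2).getD a pvLetraDflt).llet = pvCell l2 a.1 a.2 := by
          rw [show a = (a.1, a.2) from rfl, pvGrafo_getD l2 a.1 a.2 hinb]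
        simp only []
        rw [hady, hllet]
        exact ih a hinb (resul ++ pvCell l2 a.1 a.2) (n + 1) (by omega)

lemma pvBuscar_eq (l2 : List (List String)) (w : String) :
    pvBuscar l2 (pvCrearGrafo l2) w =
      Option.map (fun p => (p, pvCharAt w 0)) (pvAltBuscar l2 (pvF l2) (pvC l2) w) := by
  unfold pvBuscar pvAltBuscar
  rw [pvFindSome?_option_map]
  apply pvFindSome?_congr
  intro e he
  rw [pvFindSome?_option_map]
  apply pvFindSome?_congr
  intro f hf
  have he' := PySem.List.mem_pyRange_one.mp he
  have hf' := PySem.List.mem_pyRange_one.mp hf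
  have hinb : pvInb l2 e f = true := by
    unfold pvInb pvF pvC; rw [decide_eq_true_eq]
    omega
  simp only []
  rw [pvGrafo_getD l2 e f hinb]
  by_cases hc : pvCell l2 e f = pvCharAt w 0
  · rw [if_pos hc, if_pos hc, Option.map_some]
    rw [hc]
  · rw [if_neg hc, if_neg hc, Option.map_none]

-- per-word results of the two programs (None = "word not found")
def pvResA (l2 : List (List String)) (w : String) : Option (Option String) :=
  match pvBuscar l2 (pvCrearGrafo l2) w with
  | some p => some (pvConstruir (pvCrearGrafo l2) w w.toList.length
      (((pvCrearGrafo l2).getD p.1 pvLetraDflt).ady) p.2 1)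
  | none => none
def pvResB (l2 : List (List String)) (w : String) : Option (Option String) :=
  match pvAltBuscar l2 (pvF l2) (pvC l2) w with
  | some pos => some (pvAltConstruir l2 (pvF l2) (pvC l2) w w.toList.length pos (pvCharAt w 0) 1)
  | none => none

-- the two fold bodies
def pvStepA (l2 : List (List String)) (st : PySem.Set String × Option (Option String))
    (e : String) : PySem.Set String × Option (Option String) :=
  let pal := pvBuscar l2 (pvCrearGrafo l2) e
  let pal1 := match pal with
    | some p => some (pvConstruir (pvCrearGrafo l2) e e.toList.length
        (((pvCrearGrafo l2).getD p.1 pvLetraDflt).ady) p.2 1)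
    | none => st.2
  match pal1 with
  | some (some s) => (PySem.Set.add st.1 s, pal1)
  | _ => (st.1, pal1)
def pvStepB (l2 : List (List String)) (st : PySem.Set String × Option (Option String))
    (w : String) : PySem.Set String × Option (Option String) :=
  let pos := pvAltBuscar l2 (pvF l2) (pvC l2) w
  let pal1 := match pos with
    | some p => some (pvAltConstruir l2 (pvF l2) (pvC l2) w w.toList.length p (pvCharAt w 0) 1)
    | none => st.2
  match pal1 with
  | some o =>
    match o with
    | some s => (PySem.Set.add st.1 s, pal1)
    | none => (st.1, pal1)
  | none => (st.1, pal1)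

lemma pvProblema_4_eq (l1 : List String) (l2 : List (List String)) :
    problema_4 l1 l2 = (l1.foldl (pvStepA l2) (PySem.Set.empty, none)).1 := rfl

lemma pvProblema_4_alt_eq (l1 : List String) (l2 : List (List String)) :
    problema_4_alt l1 l2 = (l1.foldl (pvStepB l2) (PySem.Set.empty, none)).1 := rfl

lemma pvStepA_eq (l2 : List (List String)) (st : PySem.Set String × Option (Option String))
    (w : String) : pvStepA l2 st w =
    match pvResA l2 w with
    | some (some s) => (PySem.Set.add st.1 s, some (some s))
    | some none => (st.1, some none)
    | none =>
      match st.2 with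
      | some (some s) => (PySem.Set.add st.1 s, st.2)
      | _ => (st.1, st.2) := by
  unfold pvStepA pvResA
  cases pvBuscar l2 (pvCrearGrafo l2) w with
  | none =>
    cases hst : st.2 with
    | none => rfl
    | some r => cases r <;> rfl
  | some p =>
    dsimp only
    cases pvConstruir (pvCrearGrafo l2) w w.toList.length
        (((pvCrearGrafo l2).getD p.1 pvLetraDflt).ady) p.2 1 <;> rfl

lemma pvStepB_eq (l2 : List (List String)) (st : PySem.Set String × Option (Option String))
    (w : String) : pvStepB l2 st w =
    match pvResB l2 w with
    | some (some s) => (PySem.Set.add st.1 s, some (some s))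
    | some none => (st.1, some none)
    | none =>
      match st.2 with
      | some (some s) => (PySem.Set.add st.1 s, st.2)
      | _ => (st.1, st.2) := by
  unfold pvStepB pvResB
  cases pvAltBuscar l2 (pvF l2) (pvC l2) w with
  | none =>
    cases hst : st.2 with
    | none => rfl
    | some r => cases r <;> rfl
  | some pos =>
    dsimp only
    cases pvAltConstruir l2 (pvF l2) (pvC l2) w w.toList.length pos (pvCharAt w 0) 1 <;> rfl

lemma pvCharAt_self (w : String) (h : w.toList.length = 1) : pvCharAt w 0 = w := by
  obtain ⟨c, hc⟩ := List.length_eq_one_iff.mp h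
  unfold pvCharAt
  have h0 : PySem.Str.pyGet? w 0 = some c := by
    rw [show (0 : Int) = ((0 : Nat) : Int) from rfl, PySem.Str.pyGet?_natCast, hc]
    rfl
  rw [h0]
  show String.ofList [c] = w
  rw [← hc]
  exact String.ofList_toList

lemma pvToList_ne_nil (w : String) (h : w ≠ "") : w.toList ≠ [] := by
  intro hnil
  apply h
  have h2 := congrArg String.ofList hnil
  rw [String.ofList_toList] at h2
  exact h2

lemma pvAltBuscar_some (l2 : List (List String)) (w : String) (pos : Int × Int)
    (h : pvAltBuscar l2 (pvF l2) (pvC l2) w = some pos) :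
    pvInb l2 pos.1 pos.2 = true ∧ pvCell l2 pos.1 pos.2 = pvCharAt w 0 := by
  unfold pvAltBuscar at h
  obtain ⟨e, he, h2⟩ := List.exists_of_findSome?_eq_some h
  obtain ⟨f, hf, h3⟩ := List.exists_of_findSome?_eq_some h2
  have he' := PySem.List.mem_pyRange_one.mp he
  have hf' := PySem.List.mem_pyRange_one.mp hf
  by_cases hc : pvCell l2 e f = pvCharAt w 0
  · rw [if_pos hc] at h3
    obtain rfl := Option.some.inj h3
    refine ⟨by unfold pvInb; rw [decide_eq_true_eq]; exact ⟨by omega, by omega, by omega, by omega⟩, hc⟩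
  · rw [if_neg hc] at h3
    exact absurd h3 (by simp)

lemma pvRes_eq (l2 : List (List String)) (w : String) (hw : w ≠ "")
    (hok : ¬(pvF l2 = 1 ∧ pvC l2 = 1 ∧ pvCell l2 0 0 = w)) :
    pvResA l2 w = pvResB l2 w := by
  unfold pvResA pvResB
  rw [pvBuscar_eq]
  cases hb : pvAltBuscar l2 (pvF l2) (pvC l2) w with
  | none => rfl
  | some pos =>
    rw [Option.map_some]
    obtain ⟨hinb, hcell⟩ := pvAltBuscar_some l2 w pos hb
    have hlen : 1 ≤ w.toList.length := by
      have := pvToList_ne_nil w hw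
      cases hwl : w.toList with
      | nil => exact absurd hwl this
      | cons c t => simp
    simp only []
    rw [show ((pvCrearGrafo l2).getD pos pvLetraDflt).ady = pvNbrs l2 pos.1 pos.2 from by
      rw [show pos = (pos.1, pos.2) from rfl, pvGrafo_getD l2 pos.1 pos.2 hinb]]
    by_cases hbig : pvF l2 = 1 ∧ pvC l2 = 1
    · rw [pvNbrs_one l2 pos.1 pos.2 hbig hinb]
      have hA : ∀ fuel resul n, pvConstruir (pvCrearGrafo l2) w fuel [] resul n = none := by
        intro fuel resul n; cases fuel <;> rfl
      rw [hA]
      have hlen2 : 2 ≤ w.toList.length := by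
        rcases Nat.lt_or_ge 1 w.toList.length with hgt | hle
        · omega
        · exfalso
          apply hok
          have hl1 : w.toList.length = 1 := by omega
          refine ⟨hbig.1, hbig.2, ?_⟩
          have hpos : pos.1 = 0 ∧ pos.2 = 0 := by
            unfold pvInb at hinb
            rw [decide_eq_true_eq] at hinb
            rw [hbig.1, hbig.2] at hinb
            omega
          rw [hpos.1, hpos.2] at hcell
          rw [hcell]
          exact pvCharAt_self w hl1
      rw [pvAltConstruir, if_pos (by omega), pvAltNbrs_eq,
        pvNbrs_one l2 pos.1 pos.2 hbig hinb]
      rfl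
    · rw [pvConstruir_eq l2 hbig w w.toList.length pos hinb (pvCharAt w 0) 1 hlen]

lemma pvLoop_eq (l2 : List (List String)) :
    ∀ (ws : List String), (∀ w ∈ ws, pvResA l2 w = pvResB l2 w) →
    ∀ (st : PySem.Set String × Option (Option String)),
    ws.foldl (pvStepA l2) st = ws.foldl (pvStepB l2) st := by
  intro ws
  induction ws with
  | nil => intro _ _; rfl
  | cons w ws ih =>
    intro hres st
    rw [List.foldl_cons, List.foldl_cons, pvStepA_eq, pvStepB_eq, hres w (by simp)]
    exact ih (fun x hx => hres x (by simp [hx])) _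

lemma pvD_iff (l1 : List String) (l2 : List (List String)) :
    D_problema_4 l1 l2 ↔ (pvF l2 = 1 ∧ pvC l2 = 1 ∧ pvCell l2 0 0 ∈ l1) := by
  have h0 : PySem.List.pyGetD l2 (0 : Int) ([] : List String) = l2.headD [] := by
    cases l2 with
    | nil => rfl
    | cons x xs => exact PySem.List.pyGetD_zero_cons x xs []
  have h00 : pvCell l2 0 0 = (l2.headD []).headD "" := by
    unfold pvCell
    rw [h0]
    cases l2.headD [] with
    | nil => rfl
    | cons c cs => exact PySem.List.pyGetD_zero_cons c cs ""
  unfold D_problema_4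
  rw [h00]
  have hF : pvF l2 = (l2.length : Int) := by unfold pvF; rw [PySem.List.len_eq]
  have hC : pvC l2 = ((l2.headD []).length : Int) := by
    unfold pvC; rw [h0, PySem.List.len_eq]
  rw [hF, hC]
  constructor
  · rintro ⟨h1, h2, h3⟩
    exact ⟨by omega, by omega, h3⟩
  · rintro ⟨h1, h2, h3⟩
    exact ⟨by omega, by omega, h3⟩

lemma pvCharAt0 (w : String) (h : w ≠ "") : ∃ c, pvCharAt w 0 = String.ofList [c] := by
  have hnil := pvToList_ne_nil w h
  cases hwl : w.toList with
  | nil => exact absurd hwl hnil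
  | cons c t =>
    refine ⟨c, ?_⟩
    unfold pvCharAt
    rw [show PySem.Str.pyGet? w 0 = w.toList[0]? from by
      rw [show (0 : Int) = ((0 : Nat) : Int) from rfl, PySem.Str.pyGet?_natCast], hwl]
    rfl

lemma pvResA_one (l2 : List (List String)) (hF : pvF l2 = 1) (hC : pvC l2 = 1) (w : String) :
    pvResA l2 w = none ∨ pvResA l2 w = some none := by
  unfold pvResA
  rw [pvBuscar_eq]
  cases hb : pvAltBuscar l2 (pvF l2) (pvC l2) w with
  | none => exact Or.inl rfl
  | some pos =>
    obtain ⟨hinb, _⟩ := pvAltBuscar_some l2 w pos hb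
    right
    rw [Option.map_some]
    simp only []
    rw [show ((pvCrearGrafo l2).getD pos pvLetraDflt).ady = pvNbrs l2 pos.1 pos.2 from by
      rw [show pos = (pos.1, pos.2) from rfl, pvGrafo_getD l2 pos.1 pos.2 hinb],
      pvNbrs_one l2 pos.1 pos.2 ⟨hF, hC⟩ hinb]
    cases w.toList.length <;> rfl

lemma pvALoop_one (l2 : List (List String)) (hF : pvF l2 = 1) (hC : pvC l2 = 1) :
    ∀ (ws : List String) (s : PySem.Set String) (r : Option (Option String)),
    (r = none ∨ r = some none) → (ws.foldl (pvStepA l2) (s, r)).1 = s := by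
  intro ws
  induction ws with
  | nil => intro s r _; rfl
  | cons w ws ih =>
    intro s r hr
    rw [List.foldl_cons, pvStepA_eq]
    rcases pvResA_one l2 hF hC w with h | h
    · rw [h]
      rcases hr with rfl | rfl
      · exact ih s none (Or.inl rfl)
      · exact ih s (some none) (Or.inr rfl)
    · rw [h]
      exact ih s (some none) (Or.inr rfl)

lemma pvStepB_mono (l2 : List (List String)) (v : String) :
    ∀ (ws : List String) (st : PySem.Set String × Option (Option String)), v ∈ st.1 →
    v ∈ (ws.foldl (pvStepB l2) st).1 := by
  intro ws
  induction ws with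
  | nil => intro st h; exact h
  | cons w ws ih =>
    intro st h
    rw [List.foldl_cons, pvStepB_eq]
    cases pvResB l2 w with
    | none =>
      cases hst : st.2 with
      | none => exact ih _ h
      | some r =>
        cases r with
        | none => exact ih _ h
        | some s' => exact ih _ ((PySem.Set.mem_add _ _ _).mpr (Or.inl h))
    | some o =>
      cases o with
      | none => exact ih _ h
      | some s' => exact ih _ ((PySem.Set.mem_add _ _ _).mpr (Or.inl h))

-- ===== VERDICT (by name: the statement is the Claim_ definition above) =====
theorem problema_4_spec : Claim_unchanged_problema_4 := by
  unfold Claim_unchanged_problema_4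
  intro l1 l2 _ hpre hD
  obtain ⟨hne, hrows, hwords, hfound⟩ := hpre
  rw [pvProblema_4_eq, pvProblema_4_alt_eq]
  have hres : ∀ w ∈ l1, pvResA l2 w = pvResB l2 w := by
    intro w hw
    refine pvRes_eq l2 w (hwords w hw) ?_
    rintro ⟨hF, hC, hcell⟩
    exact hD ((pvD_iff l1 l2).mpr ⟨hF, hC, by rw [hcell]; exact hw⟩)
  rw [pvLoop_eq l2 l1 hres]

theorem problema_4_changed : Claim_changed_problema_4 := by unfold Claim_changed_problema_4; decide

theorem problema_4_tight : Claim_exact_problema_4 := by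
  unfold Claim_exact_problema_4
  intro l1 l2 _ hpre hD
  obtain ⟨hne, hrows, hwords, hfound⟩ := hpre
  obtain ⟨hF, hC, hcellmem⟩ := (pvD_iff l1 l2).mp hD
  cases l1 with
  | nil => exact absurd hcellmem (by simp)
  | cons w0 rest =>
    -- the single cell is the 1-character string pvCharAt w0 0
    have hw0 : (w0 : String) ≠ "" := hwords w0 (by simp)
    have hcellch : pvCell l2 0 0 = pvCharAt w0 0 := by
      rcases hfound with h | h
      · exact absurd h (by simp)
      · obtain ⟨row, hrow, c, hc, hceq⟩ := h
        have hl2len : l2.length = 1 := by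
          have := hF
          unfold pvF at this
          rw [PySem.List.len_eq] at this
          exact_mod_cast this
        obtain ⟨r0, rfl⟩ := List.length_eq_one_iff.mp hl2len
        have hrow' : row = r0 := by simpa using hrow
        subst hrow'
        have hr0len : row.length = 1 := by
          have := hC
          unfold pvC at this
          rw [show PySem.List.pyGetD [row] (0 : Int) ([] : List String) = row from
            PySem.List.pyGetD_zero_cons row [] [], PySem.List.len_eq] at this
          exact_mod_cast this
        obtain ⟨cl, rfl⟩ := List.length_eq_one_iff.mp hr0len
        have hc' : c = cl := by simpa using hc
        subst hc'
        have hcl : pvCell [[c]] 0 0 = c := by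
          unfold pvCell
          rw [show PySem.List.pyGetD [[c]] (0 : Int) ([] : List String) = [c] from
            PySem.List.pyGetD_zero_cons [c] [] [],
            PySem.List.pyGetD_zero_cons c [] ""]
        rw [hcl, hceq]
        rfl
    obtain ⟨c0, hch⟩ := pvCharAt0 w0 hw0
    have hcelllen : (pvCell l2 0 0).toList.length = 1 := by
      rw [hcellch, hch, String.toList_ofList]
      rfl
    have hcellself : pvCharAt (pvCell l2 0 0) 0 = pvCell l2 0 0 := pvCharAt_self _ hcelllen
    -- A returns the empty set
    have hA : problema_4 (w0 :: rest) l2 = [] := by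
      rw [pvProblema_4_eq]
      exact pvALoop_one l2 hF hC (w0 :: rest) PySem.Set.empty none (Or.inl rfl)
    -- B's set contains the cell
    have hrange1 : PySem.List.pyRange 0 (1 : Int) 1 = [0] := by decide
    have hbB : pvAltBuscar l2 (pvF l2) (pvC l2) (pvCell l2 0 0) = some (0, 0) := by
      unfold pvAltBuscar
      rw [hF, hC, hrange1]
      rw [List.findSome?_cons, List.findSome?_cons, hcellself, if_pos rfl]
    have hstop : ∀ (F C : Int) (w : String) (fuel : Nat) (pos : Int × Int) (resul : String)
        (n : Nat), ¬ n < w.toList.length →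
        pvAltConstruir l2 F C w fuel pos resul n = some resul := by
      intro F C w fuel pos resul n hn
      cases fuel <;> (unfold pvAltConstruir; rw [if_neg hn])
    have hrB : pvResB l2 (pvCell l2 0 0) = some (some (pvCell l2 0 0)) := by
      unfold pvResB
      rw [hbB]
      dsimp only
      rw [hstop _ _ _ _ _ _ _ (by omega), hcellself]
    have hmemB : pvCell l2 0 0 ∈ problema_4_alt (w0 :: rest) l2 := by
      rw [pvProblema_4_alt_eq]
      obtain ⟨u, t, heq⟩ := List.append_of_mem hcellmem
      rw [heq, List.foldl_append, List.foldl_cons, pvStepB_eq, hrB]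
      exact pvStepB_mono l2 _ t _ ((PySem.Set.mem_add _ _ _).mpr (Or.inr rfl))
    intro hcontra
    rw [hA] at hcontra
    rw [← hcontra] at hmemB
    exact absurd hmemB (by simp)
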